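-- pv_equiv track=rewrite | github.com/yunajoe/-Algorithm | 더맵게.py | solution
-- ===== SOURCE A (Python) =====
-- from heapq import heappush, heappop
--
-- def solution(scoville, K):
--     answer = 0
--     scoville = sorted(scoville)
--
--     while len(scoville) > 1:
--         if scoville[0] >= K:
--             return answer
--         else:
--             a = heappop(scoville)
--             b = heappop(scoville)
--             heappush(scoville, a+b*2)
--             answer += 1
--     if scoville[0] < K:  # while 문이 다 끝난다음에 시행된다. 리스트안에 모든 것들이 heappush이루어지면 1개의 원소가 남는다.
--         return -1
--     else:
--         return answer
-- ===== SOURCE B (Python) =====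
-- def solution(scoville, K):
--     answer = 0
--     work = sorted(scoville)
--     while len(work) > 1:
--         if work[0] >= K:
--             return answer
--         work = sorted(work[2:] + [work[0] + 2 * work[1]])
--         answer += 1
--     return -1 if work[0] < K else answer
-- ===== Notes on version B (the rewrite author's own statement) =====
-- stated objective: alternative
-- what changed: Drops the heapq binary heap entirely: B keeps a plain working list that it re-sorts after every merge, so the two weakest spices are simply the first two elements; no sift-up/sift-down priority-queue maintenance.
import Mathlib
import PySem

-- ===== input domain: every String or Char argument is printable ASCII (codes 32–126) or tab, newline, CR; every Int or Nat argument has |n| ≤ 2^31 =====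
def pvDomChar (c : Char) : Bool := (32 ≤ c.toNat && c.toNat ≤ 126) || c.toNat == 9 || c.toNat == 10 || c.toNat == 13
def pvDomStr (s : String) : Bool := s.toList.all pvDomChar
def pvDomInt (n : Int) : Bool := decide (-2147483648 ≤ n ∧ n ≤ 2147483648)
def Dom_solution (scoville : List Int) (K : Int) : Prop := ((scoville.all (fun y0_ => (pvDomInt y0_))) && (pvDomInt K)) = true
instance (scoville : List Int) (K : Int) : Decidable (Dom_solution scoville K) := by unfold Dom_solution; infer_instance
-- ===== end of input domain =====

-- B replaces A's heapq binary heap by a working list re-sorted after every merge; equivalence is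
-- proved on nonempty inputs (Pre_), the empty list being the one input where both Pythons raise.

-- ===== PORT A =====
-- Port of A with CPython's heapq heappush/heappop transcribed step for step
-- (_siftdown / _siftup from Lib/heapq.py). All list reads are in range during A's run on a
-- nonempty input (the only out-of-range read, scoville[0] on [], is excluded by Pre_), so
-- reads are rendered with getD 0. Each while loop carries a fuel counter (an upper bound on
-- its iteration count) that only makes the recursion structural; fuel never runs out on the
-- traced executions (proved by the *_congr/step lemmas below).
def pvGetA (l : List Int) (i : Nat) : Int := l.getD i 0

-- heapq._siftdown: Python writes heap[pos] = newitem up front and never reads heap[pos] again;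
-- here newitem is carried as an argument and written at the end — the same computation.
def siftdownGo : Nat → List Int → Nat → Nat → Int → List Int
  | 0, l, _s, p, x => l.set p x
  | f + 1, l, s, p, x =>
      if s < p then
        if x < pvGetA l ((p - 1) / 2)
        then siftdownGo f (l.set p (pvGetA l ((p - 1) / 2))) s ((p - 1) / 2) x
        else l.set p x
      else l.set p x

def siftdownLoop (l : List Int) (startpos pos : Nat) (newitem : Int) : List Int :=
  siftdownGo pos l startpos pos newitem

-- heapq._siftup: walk the hole down along the smaller child to a leaf, then _siftdown.
def siftupGo : Nat → List Int → Nat → Nat → Int → List Int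
  | 0, l, s, p, x => siftdownLoop l s p x
  | f + 1, l, s, p, x =>
      if 2 * p + 1 < l.length then
        siftupGo f
          (l.set p (pvGetA l (if 2 * p + 2 < l.length ∧ ¬ (pvGetA l (2 * p + 1) < pvGetA l (2 * p + 2))
                              then 2 * p + 2 else 2 * p + 1)))
          s
          (if 2 * p + 2 < l.length ∧ ¬ (pvGetA l (2 * p + 1) < pvGetA l (2 * p + 2))
           then 2 * p + 2 else 2 * p + 1)
          x
      else siftdownLoop l s p x

def siftupLoop (l : List Int) (startpos pos : Nat) (newitem : Int) : List Int :=
  siftupGo l.length l startpos pos newitem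

def heappush (heap : List Int) (item : Int) : List Int :=
  siftdownLoop (heap ++ [item]) 0 heap.length item

-- heappop; Python's heap.pop() raises IndexError on [] — unreachable in A under Pre_
-- (the loop guard keeps len ≥ 2 at every call), so that branch returns a dummy.
def heappop (heap : List Int) : Int × List Int :=
  match heap.getLast? with
  | none => (0, [])
  | some lastelt =>
    let rest := heap.dropLast
    if rest.isEmpty then (lastelt, rest)
    else
      let l1 := rest.set 0 lastelt
      (pvGetA rest 0, siftupLoop l1 0 0 (pvGetA l1 0))

def loopAGo : Nat → List Int → Int → Int → Int
  | 0, scoville, K, answer => if pvGetA scoville 0 < K then -1 else answer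
  | f + 1, scoville, K, answer =>
      if 1 < scoville.length then
        if K ≤ pvGetA scoville 0 then answer
        else loopAGo f
          (heappush (heappop (heappop scoville).2).2
            ((heappop scoville).1 + (heappop (heappop scoville).2).1 * 2))
          K (answer + 1)
      else if pvGetA scoville 0 < K then -1 else answer

def solutionLoopA (scoville : List Int) (K : Int) (answer : Int) : Int :=
  loopAGo scoville.length scoville K answer

def solution (scoville : List Int) (K : Int) : Int :=
  solutionLoopA (PySem.List.sorted scoville (fun x => x) false) K 0

-- ===== PORT B =====
-- the working list shrinks by one per pass, so its initial length bounds the iterations (fuel)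
def loopBGo : Nat → List Int → Int → Int → Int
  | 0, work, K, answer => if work.getD 0 0 < K then -1 else answer
  | f + 1, work, K, answer =>
      if 1 < work.length then
        if K ≤ work.getD 0 0 then answer
        else loopBGo f
          (PySem.List.sorted (work.drop 2 ++ [work.getD 0 0 + 2 * work.getD 1 0]) (fun x => x) false)
          K (answer + 1)
      else if work.getD 0 0 < K then -1 else answer

def solutionLoopB (work : List Int) (K : Int) (answer : Int) : Int :=
  loopBGo work.length work K answer

def solution_alt (scoville : List Int) (K : Int) : Int :=
  solutionLoopB (PySem.List.sorted scoville (fun x => x) false) K 0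

-- ===== PRECONDITION & SPEC =====
-- Pre_ excludes only the empty list, on which Python A raises IndexError (scoville[0]).
def Pre_solution (scoville : List Int) (K : Int) : Prop := scoville ≠ []
instance (scoville : List Int) (K : Int) : Decidable (Pre_solution scoville K) := by
  unfold Pre_solution; infer_instance
def pvWitness_solution : List Int × Int := ([1, 2, 3, 9, 10, 12], 7)

def Spec_solution (scoville : List Int) (K : Int) (out : Int) : Prop := out = solution_alt scoville K
instance (scoville : List Int) (K : Int) (out : Int) : Decidable (Spec_solution scoville K out) := by unfold Spec_solution; infer_instance

-- ===== CLAIM (what is proved, stated in full; the proofs are below) =====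
def Claim_equal_solution : Prop := ∀ (scoville : List Int) (K : Int), Dom_solution scoville K → Pre_solution scoville K → Spec_solution scoville K (solution scoville K)

-- ===== LEMMAS AND PROOFS =====

-- fuel irrelevance and one-step unfolding of the loops
theorem siftdownGo_congr : ∀ (p f₁ f₂ : Nat) (l : List Int) (s : Nat) (x : Int),
    p ≤ f₁ → p ≤ f₂ → siftdownGo f₁ l s p x = siftdownGo f₂ l s p x := by
  intro p
  induction p using Nat.strong_induction_on with
  | _ p ih =>
      intro f₁ f₂ l s x h1 h2
      match f₁, f₂ with
      | 0, 0 => rfl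
      | 0, b + 1 =>
          show l.set p x = _
          simp only [siftdownGo]
          rw [if_neg (show ¬ s < p by omega)]
      | a + 1, 0 =>
          show _ = l.set p x
          simp only [siftdownGo]
          rw [if_neg (show ¬ s < p by omega)]
      | a + 1, b + 1 =>
          simp only [siftdownGo]
          by_cases hsp : s < p
          · rw [if_pos hsp, if_pos hsp]
            by_cases hx : x < pvGetA l ((p - 1) / 2)
            · rw [if_pos hx, if_pos hx]
              exact ih ((p - 1) / 2) (by omega) a b _ s x (by omega) (by omega)
            · rw [if_neg hx, if_neg hx]
          · rw [if_neg hsp, if_neg hsp]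

theorem siftdownLoop_step_pos (l : List Int) (s p : Nat) (x : Int) (h : s < p) :
    siftdownLoop l s p x =
      if x < pvGetA l ((p - 1) / 2)
      then siftdownLoop (l.set p (pvGetA l ((p - 1) / 2))) s ((p - 1) / 2) x
      else l.set p x := by
  unfold siftdownLoop
  have hp : p = (p - 1) + 1 := by omega
  calc siftdownGo p l s p x
      = siftdownGo ((p - 1) + 1) l s p x := congrArg (fun f => siftdownGo f l s p x) hp
    _ = _ := by
        simp only [siftdownGo]
        rw [if_pos h]
        by_cases hx : x < pvGetA l ((p - 1) / 2)
        · rw [if_pos hx, if_pos hx]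
          exact siftdownGo_congr ((p - 1) / 2) (p - 1) ((p - 1) / 2) _ s x (by omega) (by omega)
        · rw [if_neg hx, if_neg hx]

theorem siftdownLoop_step_neg (l : List Int) (s p : Nat) (x : Int) (h : ¬ s < p) :
    siftdownLoop l s p x = l.set p x := by
  unfold siftdownLoop
  cases p with
  | zero => rfl
  | succ q => simp only [siftdownGo]; rw [if_neg h]

theorem siftdownLoop_length (p : Nat) : ∀ (l : List Int) (s : Nat) (x : Int),
    (siftdownLoop l s p x).length = l.length := by
  induction p using Nat.strong_induction_on with
  | _ p ih =>
      intro l s x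
      by_cases h1 : s < p
      · rw [siftdownLoop_step_pos _ _ _ _ h1]
        by_cases h2 : x < pvGetA l ((p - 1) / 2)
        · rw [if_pos h2, ih _ (by omega)]; simp
        · rw [if_neg h2]; simp
      · rw [siftdownLoop_step_neg _ _ _ _ h1]; simp

theorem siftupGo_congr : ∀ (n f₁ f₂ : Nat) (l : List Int) (s p : Nat) (x : Int),
    l.length - p = n → n ≤ f₁ → n ≤ f₂ → siftupGo f₁ l s p x = siftupGo f₂ l s p x := by
  intro n
  induction n using Nat.strong_induction_on with
  | _ n ih =>
      intro f₁ f₂ l s p x hn h1 h2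
      match f₁, f₂ with
      | 0, 0 => rfl
      | 0, b + 1 =>
          show siftdownLoop l s p x = _
          simp only [siftupGo]
          rw [if_neg (show ¬ 2 * p + 1 < l.length by omega)]
      | a + 1, 0 =>
          show _ = siftdownLoop l s p x
          simp only [siftupGo]
          rw [if_neg (show ¬ 2 * p + 1 < l.length by omega)]
      | a + 1, b + 1 =>
          simp only [siftupGo]
          by_cases h : 2 * p + 1 < l.length
          · rw [if_pos h, if_pos h]
            set c := if 2 * p + 2 < l.length ∧ ¬ (pvGetA l (2 * p + 1) < pvGetA l (2 * p + 2))
                     then 2 * p + 2 else 2 * p + 1 with hcdef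
            have hc1 : p < c := by rw [hcdef]; split <;> omega
            exact ih ((l.set p (pvGetA l c)).length - c) (by simp; omega) a b _ s c x rfl
              (by simp; omega) (by simp; omega)
          · rw [if_neg h, if_neg h]

theorem siftupLoop_step_pos (l : List Int) (s p : Nat) (x : Int) (h : 2 * p + 1 < l.length) :
    siftupLoop l s p x =
      siftupLoop
        (l.set p (pvGetA l (if 2 * p + 2 < l.length ∧ ¬ (pvGetA l (2 * p + 1) < pvGetA l (2 * p + 2))
                            then 2 * p + 2 else 2 * p + 1)))
        s
        (if 2 * p + 2 < l.length ∧ ¬ (pvGetA l (2 * p + 1) < pvGetA l (2 * p + 2))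
         then 2 * p + 2 else 2 * p + 1)
        x := by
  unfold siftupLoop
  have hl : l.length = (l.length - 1) + 1 := by omega
  calc siftupGo l.length l s p x
      = siftupGo ((l.length - 1) + 1) l s p x := congrArg (fun f => siftupGo f l s p x) hl
    _ = _ := by
        simp only [siftupGo]
        rw [if_pos h]
        by_cases hc : 2 * p + 2 < l.length ∧ ¬ (pvGetA l (2 * p + 1) < pvGetA l (2 * p + 2))
        · rw [if_pos hc]
          exact siftupGo_congr ((l.set p (pvGetA l (2 * p + 2))).length - (2 * p + 2))
            (l.length - 1) (l.set p (pvGetA l (2 * p + 2))).length _ s (2 * p + 2) x rfl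
            (by simp; omega) (by simp)
        · rw [if_neg hc]
          exact siftupGo_congr ((l.set p (pvGetA l (2 * p + 1))).length - (2 * p + 1))
            (l.length - 1) (l.set p (pvGetA l (2 * p + 1))).length _ s (2 * p + 1) x rfl
            (by simp; omega) (by simp)

theorem siftupLoop_step_neg (l : List Int) (s p : Nat) (x : Int) (h : ¬ 2 * p + 1 < l.length) :
    siftupLoop l s p x = siftdownLoop l s p x := by
  unfold siftupLoop
  rcases Nat.eq_zero_or_pos l.length with hl | hl
  · rw [hl]
    rfl
  · have hl2 : l.length = (l.length - 1) + 1 := by omega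
    calc siftupGo l.length l s p x
        = siftupGo ((l.length - 1) + 1) l s p x := congrArg (fun f => siftupGo f l s p x) hl2
      _ = _ := by simp only [siftupGo]; rw [if_neg h]

theorem siftupLoop_length (n : Nat) : ∀ (l : List Int) (s p : Nat) (x : Int),
    l.length - p = n → (siftupLoop l s p x).length = l.length := by
  induction n using Nat.strong_induction_on with
  | _ n ih =>
      intro l s p x hn
      by_cases h1 : 2 * p + 1 < l.length
      · rw [siftupLoop_step_pos _ _ _ _ h1]
        by_cases hc : 2 * p + 2 < l.length ∧ ¬ (pvGetA l (2 * p + 1) < pvGetA l (2 * p + 2))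
        · rw [if_pos hc, ih ((l.set p (pvGetA l (2*p+2))).length - (2*p+2)) (by simp; omega) _ _ _ _ rfl]
          simp
        · rw [if_neg hc, ih ((l.set p (pvGetA l (2*p+1))).length - (2*p+1)) (by simp; omega) _ _ _ _ rfl]
          simp
      · rw [siftupLoop_step_neg _ _ _ _ h1]; exact siftdownLoop_length _ _ _ _

theorem heappop_length (heap : List Int) :
    (heappop heap).2.length = heap.length - 1 := by
  unfold heappop
  cases hl : heap.getLast? with
  | none => simp_all [List.getLast?_eq_none_iff]
  | some lastelt =>
      have hne : heap ≠ [] := by rintro rfl; simp at hl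
      by_cases hre : heap.dropLast.isEmpty <;>
        simp [hre, siftupLoop_length _ _ _ _ _ rfl, List.length_dropLast]

theorem heappush_length (heap : List Int) (x : Int) :
    (heappush heap x).length = heap.length + 1 := by
  unfold heappush; simp [siftdownLoop_length]

theorem loopAGo_congr : ∀ (n f₁ f₂ : Nat) (sc : List Int) (K ans : Int),
    sc.length = n → n ≤ f₁ → n ≤ f₂ → loopAGo f₁ sc K ans = loopAGo f₂ sc K ans := by
  intro n
  induction n using Nat.strong_induction_on with
  | _ n ih =>
      intro f₁ f₂ sc K ans hn h1 h2
      match f₁, f₂ with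
      | 0, 0 => rfl
      | 0, b + 1 =>
          show (if pvGetA sc 0 < K then -1 else ans) = _
          simp only [loopAGo]
          rw [if_neg (show ¬ 1 < sc.length by omega)]
      | a + 1, 0 =>
          show _ = (if pvGetA sc 0 < K then -1 else ans)
          simp only [loopAGo]
          rw [if_neg (show ¬ 1 < sc.length by omega)]
      | a + 1, b + 1 =>
          simp only [loopAGo]
          by_cases h : 1 < sc.length
          · rw [if_pos h, if_pos h]
            by_cases hK : K ≤ pvGetA sc 0
            · rw [if_pos hK, if_pos hK]
            · rw [if_neg hK, if_neg hK]
              have hlen : (heappush (heappop (heappop sc).2).2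
                  ((heappop sc).1 + (heappop (heappop sc).2).1 * 2)).length = n - 1 := by
                simp only [heappush_length, heappop_length]; omega
              exact ih (n - 1) (by omega) a b _ K (ans + 1) hlen (by omega) (by omega)
          · rw [if_neg h, if_neg h]

theorem loopA_step (sc : List Int) (K ans : Int) :
    solutionLoopA sc K ans =
      if 1 < sc.length then
        if K ≤ pvGetA sc 0 then ans
        else solutionLoopA
          (heappush (heappop (heappop sc).2).2 ((heappop sc).1 + (heappop (heappop sc).2).1 * 2))
          K (ans + 1)
      else if pvGetA sc 0 < K then -1 else ans := by
  unfold solutionLoopA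
  by_cases h : 1 < sc.length
  · rw [if_pos h]
    have hl : sc.length = (sc.length - 1) + 1 := by omega
    calc loopAGo sc.length sc K ans
        = loopAGo ((sc.length - 1) + 1) sc K ans :=
          congrArg (fun f => loopAGo f sc K ans) hl
      _ = _ := by
          simp only [loopAGo]
          rw [if_pos h]
          by_cases hK : K ≤ pvGetA sc 0
          · rw [if_pos hK, if_pos hK]
          · rw [if_neg hK, if_neg hK]
            have hlen : (heappush (heappop (heappop sc).2).2
                ((heappop sc).1 + (heappop (heappop sc).2).1 * 2)).length = sc.length - 1 := by
              simp only [heappush_length, heappop_length]; omega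
            exact loopAGo_congr (sc.length - 1) (sc.length - 1) _ _ K (ans + 1) hlen
              (by omega) (by omega)
  · rw [if_neg h]
    rcases Nat.eq_zero_or_pos sc.length with hl | hl
    · rw [hl]
      rfl
    · have hl2 : sc.length = (sc.length - 1) + 1 := by omega
      calc loopAGo sc.length sc K ans
          = loopAGo ((sc.length - 1) + 1) sc K ans :=
            congrArg (fun f => loopAGo f sc K ans) hl2
        _ = _ := by simp only [loopAGo]; rw [if_neg h]

theorem loopBGo_congr : ∀ (n f₁ f₂ : Nat) (w : List Int) (K ans : Int),
    w.length = n → n ≤ f₁ → n ≤ f₂ → loopBGo f₁ w K ans = loopBGo f₂ w K ans := by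
  intro n
  induction n using Nat.strong_induction_on with
  | _ n ih =>
      intro f₁ f₂ w K ans hn h1 h2
      match f₁, f₂ with
      | 0, 0 => rfl
      | 0, b + 1 =>
          show (if w.getD 0 0 < K then -1 else ans) = _
          simp only [loopBGo]
          rw [if_neg (show ¬ 1 < w.length by omega)]
      | a + 1, 0 =>
          show _ = (if w.getD 0 0 < K then -1 else ans)
          simp only [loopBGo]
          rw [if_neg (show ¬ 1 < w.length by omega)]
      | a + 1, b + 1 =>
          simp only [loopBGo]
          by_cases h : 1 < w.length
          · rw [if_pos h, if_pos h]
            by_cases hK : K ≤ w.getD 0 0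
            · rw [if_pos hK, if_pos hK]
            · rw [if_neg hK, if_neg hK]
              have hlen : (PySem.List.sorted (w.drop 2 ++ [w.getD 0 0 + 2 * w.getD 1 0])
                  (fun x => x) false).length = n - 1 := by
                simp [PySem.List.length_sorted]; omega
              exact ih (n - 1) (by omega) a b _ K (ans + 1) hlen (by omega) (by omega)
          · rw [if_neg h, if_neg h]

theorem loopB_step (w : List Int) (K ans : Int) :
    solutionLoopB w K ans =
      if 1 < w.length then
        if K ≤ w.getD 0 0 then ans
        else solutionLoopB
          (PySem.List.sorted (w.drop 2 ++ [w.getD 0 0 + 2 * w.getD 1 0]) (fun x => x) false)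
          K (ans + 1)
      else if w.getD 0 0 < K then -1 else ans := by
  unfold solutionLoopB
  by_cases h : 1 < w.length
  · rw [if_pos h]
    have hl : w.length = (w.length - 1) + 1 := by omega
    calc loopBGo w.length w K ans
        = loopBGo ((w.length - 1) + 1) w K ans :=
          congrArg (fun f => loopBGo f w K ans) hl
      _ = _ := by
          simp only [loopBGo]
          rw [if_pos h]
          by_cases hK : K ≤ w.getD 0 0
          · rw [if_pos hK, if_pos hK]
          · rw [if_neg hK, if_neg hK]
            have hlen : (PySem.List.sorted (w.drop 2 ++ [w.getD 0 0 + 2 * w.getD 1 0])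
                (fun x => x) false).length = w.length - 1 := by
              simp [PySem.List.length_sorted]; omega
            exact loopBGo_congr (w.length - 1) (w.length - 1) _ _ K (ans + 1) hlen
              (by omega) (by omega)
  · rw [if_neg h]
    rcases Nat.eq_zero_or_pos w.length with hl | hl
    · rw [hl]
      rfl
    · have hl2 : w.length = (w.length - 1) + 1 := by omega
      calc loopBGo w.length w K ans
          = loopBGo ((w.length - 1) + 1) w K ans :=
            congrArg (fun f => loopBGo f w K ans) hl2
        _ = _ := by simp only [loopBGo]; rw [if_neg h]

def IsHeap (l : List Int) : Prop :=
  ∀ i j : Nat, (j = 2 * i + 1 ∨ j = 2 * i + 2) → j < l.length → pvGetA l i ≤ pvGetA l j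

theorem g_eq_getElem (l : List Int) (i : Nat) (h : i < l.length) : pvGetA l i = l[i] := by
  simp [pvGetA, List.getD_eq_getElem?_getD, List.getElem?_eq_getElem h]

theorem g_set_self (l : List Int) (i : Nat) (a : Int) (h : i < l.length) :
    pvGetA (l.set i a) i = a := by
  simp [pvGetA, List.getD_eq_getElem?_getD, h]

theorem g_set_ne (l : List Int) (i j : Nat) (a : Int) (h : i ≠ j) :
    pvGetA (l.set i a) j = pvGetA l j := by
  simp [pvGetA, List.getD_eq_getElem?_getD, List.getElem?_set_ne h]

theorem set_g_self (l : List Int) (i : Nat) (h : i < l.length) :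
    l.set i (pvGetA l i) = l := by
  rw [g_eq_getElem l i h]; exact List.set_getElem_self ..

theorem count_set (l : List Int) (i : Nat) (a b : Int) (h : i < l.length) :
    (l.set i a).count b + (if pvGetA l i = b then 1 else 0)
      = l.count b + (if a = b then 1 else 0) := by
  induction l generalizing i with
  | nil => simp at h
  | cons c t ih =>
      cases i with
      | zero => simp [pvGetA, List.count_cons]; split_ifs <;> omega
      | succ i =>
          have := ih i (by simpa using h)
          simp only [List.set_cons_succ, List.count_cons, pvGetA, List.getD_cons_succ] at *
          split_ifs at * <;> omega

theorem swap_perm (l : List Int) (i j : Nat) (x : Int)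
    (hi : i < l.length) (hj : j < l.length) (hij : i ≠ j) :
    ((l.set i (pvGetA l j)).set j x).Perm (l.set i x) := by
  rw [List.perm_iff_count]
  intro b
  have h1 := count_set l i (pvGetA l j) b hi
  have h2 := count_set (l.set i (pvGetA l j)) j x b (by simpa using hj)
  have h3 := count_set l i x b hi
  rw [g_set_ne l i j _ hij] at h2
  split_ifs at h1 h2 h3 <;> omega

theorem siftdownLoop_perm (p : Nat) : ∀ (l : List Int) (s : Nat) (x : Int), p < l.length →
    (siftdownLoop l s p x).Perm (l.set p x) := by
  induction p using Nat.strong_induction_on with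
  | _ p ih =>
      intro l s x hp
      by_cases h1 : s < p
      · rw [siftdownLoop_step_pos _ _ _ _ h1]
        by_cases h2 : x < pvGetA l ((p - 1) / 2)
        · rw [if_pos h2]
          have hpp : (p - 1) / 2 < l.length := by omega
          refine ((ih _ (by omega) _ s x (by simpa using hpp)).trans ?_)
          exact swap_perm l p ((p - 1) / 2) x hp hpp (by omega)
        · rw [if_neg h2]
      · rw [siftdownLoop_step_neg _ _ _ _ h1]

theorem siftupLoop_perm (n : Nat) : ∀ (l : List Int) (s p : Nat) (x : Int),
    l.length - p = n → p < l.length → (siftupLoop l s p x).Perm (l.set p x) := by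
  induction n using Nat.strong_induction_on with
  | _ n ih =>
      intro l s p x hn hp
      by_cases h1 : 2 * p + 1 < l.length
      · rw [siftupLoop_step_pos _ _ _ _ h1]
        set c := if 2 * p + 2 < l.length ∧ ¬ (pvGetA l (2 * p + 1) < pvGetA l (2 * p + 2))
                 then 2 * p + 2 else 2 * p + 1 with hcdef
        have hc1 : p < c := by rw [hcdef]; split <;> omega
        have hc2 : c < l.length := by rw [hcdef]; split <;> omega
        refine ((ih ((l.set p (pvGetA l c)).length - c) (by simp; omega) _ s c x rfl
          (by simpa using hc2)).trans ?_)
        exact swap_perm l p c x hp hc2 (by omega)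
      · rw [siftupLoop_step_neg _ _ _ _ h1]; exact siftdownLoop_perm _ _ _ _ hp

theorem set_append_singleton (h : List Int) (x y : Int) :
    (h ++ [x]).set h.length y = h ++ [y] := by
  induction h with
  | nil => simp
  | cons a t ih => simp [ih]

theorem heappush_perm (h : List Int) (x : Int) : (heappush h x).Perm (x :: h) := by
  unfold heappush
  refine ((siftdownLoop_perm _ _ _ _ (by simp)).trans ?_)
  rw [set_append_singleton]
  exact List.perm_append_singleton _ _

theorem g_append_lt (h t : List Int) (i : Nat) (hi : i < h.length) :
    pvGetA (h ++ t) i = pvGetA h i := by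
  simp [pvGetA, List.getD_eq_getElem?_getD, List.getElem?_append_left hi]

theorem siftdownLoop_isHeap (p : Nat) : ∀ (l : List Int) (x : Int), p < l.length →
    (∀ i j : Nat, (j = 2 * i + 1 ∨ j = 2 * i + 2) → j < l.length → j ≠ p →
      pvGetA (l.set p x) i ≤ pvGetA (l.set p x) j) →
    (∀ j : Nat, (j = 2 * p + 1 ∨ j = 2 * p + 2) → j < l.length → 0 < p →
      pvGetA l ((p - 1) / 2) ≤ pvGetA l j) →
    IsHeap (siftdownLoop l 0 p x) := by
  induction p using Nat.strong_induction_on with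
  | _ p ih =>
      intro l x hp hA hG
      by_cases h1 : 0 < p
      · rw [siftdownLoop_step_pos _ _ _ _ h1]
        have hpp : (p - 1) / 2 < l.length := by omega
        have hppp : (p - 1) / 2 < p := by omega
        by_cases h2 : x < pvGetA l ((p - 1) / 2)
        · rw [if_pos h2]
          set pp := (p - 1) / 2 with hppdef
          apply ih pp hppp _ x (by simpa using hpp)
          · -- hA for the recursive call
            intro i j hedge hjlen hjpp
            simp only [List.length_set] at hjlen
            have hij : i = (j - 1) / 2 := by omega
            by_cases hjp : p = j
            · subst hjp
              have hipp : i = pp := by omega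
              subst hipp
              rw [g_set_self _ _ _ (by simpa using hpp),
                  g_set_ne _ _ _ _ (by omega), g_set_self _ _ _ hp]
              exact le_of_lt h2
            · rw [g_set_ne (l.set p (pvGetA l pp)) pp j x (by omega),
                  g_set_ne l p j (pvGetA l pp) (by omega)]
              by_cases hip : i = p
              · subst hip
                rw [g_set_ne _ _ _ _ (by omega), g_set_self _ _ _ hp]
                exact hG j hedge hjlen h1
              · by_cases hipp : i = pp
                · subst hipp
                  rw [g_set_self _ _ _ (by simpa using hpp)]
                  have := hA pp j hedge hjlen (by omega)
                  rw [g_set_ne _ _ _ _ (by omega), g_set_ne _ _ _ _ (by omega)] at this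
                  calc x ≤ pvGetA l pp := le_of_lt h2
                    _ ≤ pvGetA l j := this
                · rw [g_set_ne _ _ _ _ (by omega), g_set_ne _ _ _ _ (by omega)]
                  have := hA i j hedge hjlen (by omega)
                  rwa [g_set_ne _ _ _ _ (by omega), g_set_ne _ _ _ _ (by omega)] at this
          · -- hG for the recursive call
            intro j hedge hjlen h0pp
            simp only [List.length_set] at hjlen
            have hgp : (pp - 1) / 2 < pp := by omega
            rw [g_set_ne _ _ _ _ (by omega)]
            by_cases hjp : p = j
            · subst hjp
              rw [g_set_self _ _ _ hp]
              have := hA ((pp - 1) / 2) pp (by omega) (by omega) (by omega)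
              rwa [g_set_ne _ _ _ _ (by omega), g_set_ne _ _ _ _ (by omega)] at this
            · rw [g_set_ne _ _ _ _ (by omega)]
              have e1 := hA ((pp - 1) / 2) pp (by omega) (by omega) (by omega)
              rw [g_set_ne _ _ _ _ (by omega), g_set_ne _ _ _ _ (by omega)] at e1
              have e2 := hA pp j hedge hjlen (by omega)
              rw [g_set_ne _ _ _ _ (by omega), g_set_ne _ _ _ _ (by omega)] at e2
              exact e1.trans e2
        · rw [if_neg h2]
          intro i j hedge hjlen
          simp only [List.length_set] at hjlen
          by_cases hjp : p = j
          · subst hjp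
            have hipp : i = (p - 1) / 2 := by omega
            subst hipp
            rw [g_set_ne _ _ _ _ (by omega), g_set_self _ _ _ hp]
            omega
          · exact hA i j hedge hjlen (by omega)
      · rw [siftdownLoop_step_neg _ _ _ _ h1]
        intro i j hedge hjlen
        simp only [List.length_set] at hjlen
        exact hA i j hedge hjlen (by omega)

theorem siftupLoop_isHeap (n : Nat) : ∀ (l : List Int) (p : Nat) (x : Int),
    l.length - p = n → p < l.length →
    (∀ i j : Nat, (j = 2 * i + 1 ∨ j = 2 * i + 2) → j < l.length → i ≠ p → j ≠ p →
      pvGetA l i ≤ pvGetA l j) →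
    (∀ j : Nat, (j = 2 * p + 1 ∨ j = 2 * p + 2) → j < l.length → 0 < p →
      pvGetA l ((p - 1) / 2) ≤ pvGetA l j) →
    IsHeap (siftupLoop l 0 p x) := by
  induction n using Nat.strong_induction_on with
  | _ n ih =>
      intro l p x hn hp hW1 hW2
      by_cases h1 : 2 * p + 1 < l.length
      · rw [siftupLoop_step_pos _ _ _ _ h1]
        set c := if 2 * p + 2 < l.length ∧ ¬ (pvGetA l (2 * p + 1) < pvGetA l (2 * p + 2))
                 then 2 * p + 2 else 2 * p + 1 with hcdef
        have hc1 : p < c := by rw [hcdef]; split <;> omega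
        have hc2 : c < l.length := by rw [hcdef]; split <;> omega
        have hcchild : c = 2 * p + 1 ∨ c = 2 * p + 2 := by rw [hcdef]; split <;> omega
        have hminc : ∀ j : Nat, (j = 2 * p + 1 ∨ j = 2 * p + 2) → j < l.length →
            pvGetA l c ≤ pvGetA l j := by
          intro j hj hjl
          rw [hcdef]
          split
          · rename_i hcond
            rcases hj with rfl | rfl
            · omega
            · exact le_refl _
          · rename_i hcond
            rcases hj with rfl | rfl
            · exact le_refl _
            · have : pvGetA l (2 * p + 1) < pvGetA l (2 * p + 2) := by
                by_contra hcon; exact hcond ⟨hjl, hcon⟩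
              omega
        apply ih ((l.set p (pvGetA l c)).length - c) (by simp; omega) _ c x rfl
          (by simpa using hc2)
        · -- W1 for the recursive call
          intro i j hedge hjlen hic hjc
          simp only [List.length_set] at hjlen
          have hij : i = (j - 1) / 2 := by omega
          by_cases hjp : p = j
          · subst hjp
            have h0p : 0 < p := by omega
            have hipp : i = (p - 1) / 2 := by omega
            subst hipp
            rw [g_set_ne l p ((p - 1) / 2) (pvGetA l c) (by omega), g_set_self _ _ _ hp]
            exact hW2 c hcchild hc2 h0p
          · rw [g_set_ne l p j (pvGetA l c) (by omega)]
            by_cases hip : i = p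
            · subst hip
              rw [g_set_self _ _ _ hp]
              exact hminc j hedge hjlen
            · rw [g_set_ne l p i (pvGetA l c) (by omega)]
              exact hW1 i j hedge hjlen hip (by omega)
        · -- W2 for the recursive call
          intro j hedge hjlen _h0c
          simp only [List.length_set] at hjlen
          have hcp : (c - 1) / 2 = p := by omega
          rw [hcp, g_set_self _ _ _ hp, g_set_ne l p j (pvGetA l c) (by omega)]
          exact hW1 c j hedge hjlen (by omega) (by omega)
      · rw [siftupLoop_step_neg _ _ _ _ h1]
        apply siftdownLoop_isHeap p l x hp
        · intro i j hedge hjlen hjp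
          by_cases hip : i = p
          · subst hip; omega
          · rw [g_set_ne _ _ _ _ (by omega), g_set_ne _ _ _ _ (by omega)]
            exact hW1 i j hedge hjlen hip (by omega)
        · intro j hedge hjlen _; omega

theorem heappush_isHeap (h : List Int) (x : Int) (hh : IsHeap h) : IsHeap (heappush h x) := by
  unfold heappush
  apply siftdownLoop_isHeap h.length (h ++ [x]) x (by simp)
  · intro i j hedge hjlen hjp
    simp only [List.length_append, List.length_singleton] at hjlen
    have hjh : j < h.length := by omega
    have hih : i < h.length := by omega
    rw [set_append_singleton, g_append_lt _ _ _ hih, g_append_lt _ _ _ hjh]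
    exact hh i j hedge hjh
  · intro j hedge hjlen h0
    simp only [List.length_append, List.length_singleton] at hjlen
    omega

theorem heappop_of_ne (h : List Int) (hne : h ≠ []) :
    heappop h =
      if h.dropLast.isEmpty then (h.getLast hne, h.dropLast)
      else (pvGetA h.dropLast 0,
            siftupLoop (h.dropLast.set 0 (h.getLast hne)) 0 0
              (pvGetA (h.dropLast.set 0 (h.getLast hne)) 0)) := by
  unfold heappop
  rw [List.getLast?_eq_some_getLast hne]

theorem heappop_spec (h : List Int) (hh : IsHeap h) (hne : h ≠ []) :
    (heappop h).1 = pvGetA h 0 ∧ ((heappop h).1 :: (heappop h).2).Perm h ∧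
      IsHeap (heappop h).2 := by
  have hsplit : h.dropLast ++ [h.getLast hne] = h := List.dropLast_append_getLast hne
  rw [heappop_of_ne h hne]
  by_cases hre : h.dropLast.isEmpty
  · have hdl : h.dropLast = [] := by simpa [List.isEmpty_iff] using hre
    rw [if_pos hre]
    refine ⟨?_, ?_, ?_⟩
    · conv_rhs => rw [← hsplit]
      rw [hdl]
      simp [pvGetA]
    · conv_rhs => rw [← hsplit]
      rw [hdl]
      simp
    · rw [hdl]; intro i j _ hjl; simp at hjl
  · have hdl : h.dropLast ≠ [] := by simpa [List.isEmpty_iff] using hre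
    have hdlen : 0 < h.dropLast.length := List.length_pos_iff.mpr hdl
    rw [if_neg hre]
    have hglen : (h.dropLast.set 0 (h.getLast hne)).length = h.dropLast.length := by simp
    have hperm1 : (siftupLoop (h.dropLast.set 0 (h.getLast hne)) 0 0
        (pvGetA (h.dropLast.set 0 (h.getLast hne)) 0)).Perm (h.dropLast.set 0 (h.getLast hne)) := by
      have := siftupLoop_perm ((h.dropLast.set 0 (h.getLast hne)).length - 0)
        (h.dropLast.set 0 (h.getLast hne)) 0 0
        (pvGetA (h.dropLast.set 0 (h.getLast hne)) 0) rfl (by omega)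
      rwa [set_g_self _ _ (by omega)] at this
    have hhlen : h.length = h.dropLast.length + 1 := by
      conv_lhs => rw [← hsplit]
      simp
    refine ⟨?_, ?_, ?_⟩
    · show pvGetA h.dropLast 0 = pvGetA h 0
      conv_rhs => rw [← hsplit]
      exact (g_append_lt _ _ _ hdlen).symm
    · show (pvGetA h.dropLast 0 :: siftupLoop (h.dropLast.set 0 (h.getLast hne)) 0 0
          (pvGetA (h.dropLast.set 0 (h.getLast hne)) 0)).Perm h
      refine (List.Perm.cons _ hperm1).trans ?_
      conv_rhs => rw [← hsplit]
      obtain ⟨r0, rt, hrt⟩ := List.exists_cons_of_ne_nil hdl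
      rw [hrt]
      simp only [List.set_cons_zero, pvGetA, List.getD_cons_zero, List.cons_append]
      exact List.Perm.cons _ (List.perm_append_singleton _ _).symm
    · apply siftupLoop_isHeap _ _ _ _ rfl (by omega)
      · intro i j hedge hjlen hip hjp
        simp only [List.length_set] at hjlen
        rw [g_set_ne _ _ _ _ (by omega), g_set_ne _ _ _ _ (by omega)]
        have hi' : i < h.dropLast.length := by omega
        rw [← g_append_lt h.dropLast [h.getLast hne] i hi',
            ← g_append_lt h.dropLast [h.getLast hne] j hjlen, hsplit]
        exact hh i j hedge (by omega)
      · intro j hedge hjlen h0; omega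

theorem root_min_idx (l : List Int) (hl : IsHeap l) :
    ∀ i : Nat, i < l.length → pvGetA l 0 ≤ pvGetA l i := by
  intro i
  induction i using Nat.strong_induction_on with
  | _ i ih =>
      intro hi
      by_cases h0 : i = 0
      · subst h0; exact le_refl _
      · have hedge : i = 2 * ((i - 1) / 2) + 1 ∨ i = 2 * ((i - 1) / 2) + 2 := by omega
        exact (ih ((i - 1) / 2) (by omega) (by omega)).trans (hl _ i hedge hi)

theorem root_min (l : List Int) (hl : IsHeap l) : ∀ x ∈ l, pvGetA l 0 ≤ x := by
  intro x hx
  obtain ⟨i, hi, rfl⟩ := List.mem_iff_getElem.mp hx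
  rw [← g_eq_getElem l i hi]
  exact root_min_idx l hl i hi

theorem pairwise_isHeap (l : List Int) (hl : l.Pairwise (· ≤ ·)) : IsHeap l := by
  rw [List.pairwise_iff_getElem] at hl
  intro i j hedge hj
  have hij : i < j := by omega
  have hi : i < l.length := by omega
  rw [g_eq_getElem l i hi, g_eq_getElem l j hj]
  exact hl i j hi hj hij

theorem heads_eq (h w : List Int) (hh : IsHeap h) (hp : h.Perm w)
    (hs : w.Pairwise (· ≤ ·)) (hwne : w ≠ []) : pvGetA h 0 = pvGetA w 0 := by
  obtain ⟨w0, wt, rfl⟩ := List.exists_cons_of_ne_nil hwne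
  have hgw : pvGetA (w0 :: wt) 0 = w0 := by simp [pvGetA]
  rw [hgw]
  have hhne : h ≠ [] := by
    intro hcon; rw [hcon] at hp; exact (by simp : w0 :: wt ≠ []) hp.symm.eq_nil
  have hle1 : pvGetA h 0 ≤ w0 :=
    root_min h hh w0 (hp.mem_iff.mpr (by simp))
  have hmem : pvGetA h 0 ∈ h := by
    have h0 : 0 < h.length := List.length_pos_iff.mpr hhne
    rw [g_eq_getElem h 0 h0]; exact List.getElem_mem h0
  have hle2 : w0 ≤ pvGetA h 0 := by
    have := hp.mem_iff.mp hmem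
    rcases List.mem_cons.mp this with heq | hmem'
    · omega
    · exact (List.pairwise_cons.mp hs).1 _ hmem'
  omega

theorem loop_eq (n : Nat) : ∀ (h w : List Int) (K ans : Int), h.length = n → IsHeap h →
    h.Perm w → w.Pairwise (· ≤ ·) → solutionLoopA h K ans = solutionLoopB w K ans := by
  induction n using Nat.strong_induction_on with
  | _ n ih =>
      intro h w K ans hlen hheap hperm hsort
      have hwlen : w.length = n := by rw [← hperm.length_eq, hlen]
      rw [loopA_step, loopB_step]
      have hBA : ∀ (l : List Int) (i : Nat), l.getD i 0 = pvGetA l i := fun _ _ => rfl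
      simp only [hBA]
      by_cases hn : 1 < n
      · have hwne : w ≠ [] := by
          intro hcon; rw [hcon] at hwlen; simp at hwlen; omega
        have hhead : pvGetA h 0 = pvGetA w 0 := heads_eq h w hheap hperm hsort hwne
        rw [if_pos (by omega : 1 < h.length), if_pos (by omega : 1 < w.length), hhead]
        by_cases hK : K ≤ pvGetA w 0
        · rw [if_pos hK, if_pos hK]
        · rw [if_neg hK, if_neg hK]
          -- decompose w
          obtain ⟨w0, wt, rfl⟩ := List.exists_cons_of_ne_nil hwne
          have hwtne : wt ≠ [] := by
            intro hcon; rw [hcon] at hwlen; simp at hwlen; omega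
          obtain ⟨w1, wr, rfl⟩ := List.exists_cons_of_ne_nil hwtne
          have hhne : h ≠ [] := by
            intro hcon; rw [hcon] at hlen; simp at hlen; omega
          obtain ⟨e1, e2, e3⟩ := heappop_spec h hheap hhne
          have ha : (heappop h).1 = w0 := by rw [e1, hhead]; rfl
          rw [ha] at e2
          have hperm1 : (heappop h).2.Perm (w1 :: wr) :=
            ((e2.trans hperm).cons_inv)
          have h1len : (heappop h).2.length = n - 1 := by
            have := e2.length_eq
            simp only [List.length_cons] at this
            omega
          have h1ne : (heappop h).2 ≠ [] := by
            intro hcon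
            rw [hcon] at h1len; simp at h1len; omega
          obtain ⟨f1, f2, f3⟩ := heappop_spec (heappop h).2 e3 h1ne
          have hsw : (w1 :: wr).Pairwise (· ≤ ·) := (List.pairwise_cons.mp hsort).2
          have hb : (heappop (heappop h).2).1 = w1 := by
            rw [f1, heads_eq (heappop h).2 (w1 :: wr) e3 hperm1 hsw (by simp)]; rfl
          rw [hb] at f2
          have hperm2 : (heappop (heappop h).2).2.Perm wr := (f2.trans hperm1).cons_inv
          have hBlist : (w0 :: w1 :: wr).drop 2 ++
              [pvGetA (w0 :: w1 :: wr) 0 + 2 * pvGetA (w0 :: w1 :: wr) 1]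
              = wr ++ [w0 + 2 * w1] := rfl
          rw [ha, hb, hBlist]
          have hmul : w0 + w1 * 2 = w0 + 2 * w1 := by ring
          rw [hmul]
          apply ih (n - 1) (by omega)
          · simp only [heappush_length]
            have := f2.length_eq
            simp only [List.length_cons] at this
            omega
          · exact heappush_isHeap _ _ f3
          · refine (heappush_perm _ _).trans ?_
            refine (List.Perm.cons _ hperm2).trans ?_
            refine ((List.perm_append_singleton _ _).symm).trans ?_
            exact (PySem.List.sorted_perm _ _ _).symm
          · simpa using PySem.List.sorted_pairwise (wr ++ [w0 + 2 * w1]) (fun x => x)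
      · rw [if_neg (by omega : ¬ 1 < h.length), if_neg (by omega : ¬ 1 < w.length)]
        have hhw : pvGetA h 0 = pvGetA w 0 := by
          by_cases h0 : n = 0
          · have : h = [] := List.length_eq_zero_iff.mp (by omega)
            have hw0 : w = [] := List.length_eq_zero_iff.mp (by omega)
            rw [this, hw0]
          · obtain ⟨a, rfl⟩ := List.length_eq_one_iff.mp (by omega : h.length = 1)
            rw [List.singleton_perm.mp hperm]
        rw [hhw]

-- ===== VERDICT (by name: the statement is the Claim_ definition above) =====
theorem solution_spec : Claim_equal_solution := by
  intro scoville K _ _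
  unfold Spec_solution solution solution_alt
  exact loop_eq _ _ _ K 0 rfl
    (pairwise_isHeap _ (by simpa using PySem.List.sorted_pairwise scoville (fun x => x)))
    (List.Perm.refl _)
    (by simpa using PySem.List.sorted_pairwise scoville (fun x => x))
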